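-- pv_equiv track=rewrite | github.com/CNLHC/DigiC2018 | Assignment4/pyscript/lambTTGenerator.py | _lamb
-- ===== SOURCE A (Python) =====
-- import copy
--
-- def _lamb(number):
--     """ generate n-lamb status in one cycle"""
--     index = 0
--     time = number
--     out=[]
--     N = lambda x: 0 if x == 1 else 1
--     state=4
--     #0-all0 1-all1
--     innerCounter = 0
--
--     while index<=time:
--         if state==0:
--             lam=[1]*number
--             innerCounter = 2
--             state=3
--         elif state==3:
--             if innerCounter<number:
--                 lam = list(map(lambda i:N(i[1]) if (i[0]>0 and (i[0]+1)%(innerCounter%number)==0) else i[1],enumerate(lam)))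
--                 innerCounter+=1
--             else:
--                 lam = list(map(lambda i:N(i[1]) if (i[0]>0 and (i[0]+1)%number==0) else i[1],enumerate(lam)))
--                 state=4
--         elif state==4:
--             lam=[0]*number
--             state=0
--             innerCounter = 0
--         out.append(copy.deepcopy(lam))
--         index+=1
--     return out
-- ===== SOURCE B (Python) =====
-- def _lamb(number):
--     """generate n-lamb status in one cycle"""
--     cols = []
--     for j in range(number):
--         par = 0
--         col = [0]
--         for i in range(1, number + 1):
--             if i != 1 and (j + 1) % i == 0:
--                 par = 1 - par
--             col.append(1 - par)
--         cols.append(col)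
--     return [[cols[j][i] for j in range(number)] for i in range(number + 1)]
-- ===== Notes on version B (the rewrite author's own statement) =====
-- stated objective: alternative
-- what changed: Replaces the 4/0/3 state machine that mutates one lamp row across the while loop by a column-wise construction: for each lamp a running divisor-count parity builds its whole on/off column in one pass, and the rows are then read off by transposition.
import Mathlib
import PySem

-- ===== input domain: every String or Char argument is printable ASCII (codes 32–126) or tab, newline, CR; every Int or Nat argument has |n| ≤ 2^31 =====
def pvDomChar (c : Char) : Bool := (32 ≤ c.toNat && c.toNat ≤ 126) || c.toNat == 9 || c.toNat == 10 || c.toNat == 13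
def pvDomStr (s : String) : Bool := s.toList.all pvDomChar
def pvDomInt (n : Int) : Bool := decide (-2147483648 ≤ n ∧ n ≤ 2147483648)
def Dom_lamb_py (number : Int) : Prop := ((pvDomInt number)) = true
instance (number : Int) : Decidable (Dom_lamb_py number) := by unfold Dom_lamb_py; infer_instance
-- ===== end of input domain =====

-- B replaces A's while-loop state machine by a column-wise construction: one running divisor-parity per lamp, then the rows are read off; no state machine, no row-to-row list mutation.

-- ===== PORT A =====
-- N = lambda x: 0 if x == 1 else 1
def pyN (x : Int) : Int := if x = 1 then 0 else 1

-- the map(lambda i: N(i[1]) if (i[0]>0 and (i[0]+1)%m==0) else i[1], enumerate(lam)) step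
def lambStep3 (lam : List Int) (m : Int) : List Int :=
  (PySem.List.enumerate lam).map
    (fun p => if 0 < p.1 ∧ PySem.Int.mod (p.1 + 1) m = 0 then pyN p.2 else p.2)

-- the while loop; fuel = number of remaining iterations (index ≤ time ⇒ (time-index+1).toNat)
def lambLoop (number : Int) : Nat → Int → Int → List Int → List (List Int) → List (List Int)
  | 0, _, _, _, out => out
  | fuel + 1, state, innerCounter, lam, out =>
    if state = 0 then
      let lam' := List.replicate number.toNat 1
      lambLoop number fuel 3 2 lam' (out ++ [lam'])
    else if state = 3 then
      if innerCounter < number then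
        let lam' := lambStep3 lam (PySem.Int.mod innerCounter number)
        lambLoop number fuel 3 (innerCounter + 1) lam' (out ++ [lam'])
      else
        let lam' := lambStep3 lam number
        lambLoop number fuel 4 innerCounter lam' (out ++ [lam'])
    else if state = 4 then
      let lam' := List.replicate number.toNat 0
      lambLoop number fuel 0 0 lam' (out ++ [lam'])
    else
      -- unreachable: state stays in {0,3,4}
      lambLoop number fuel state innerCounter lam (out ++ [lam])

def lamb_py (number : Int) : List (List Int) :=
  lambLoop number (number + 1).toNat 4 0 [] []

-- ===== PORT B =====
-- column j: running parity par of the divisors of j+1 seen so far; col[i] = value of lamp j in row i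
def lamb_py_alt (number : Int) : List (List Int) :=
  let cols := (PySem.List.pyRange 0 number 1).map (fun j =>
    ((PySem.List.pyRange 1 (number + 1) 1).foldl
      (fun s i =>
        let par := if ¬ i = 1 ∧ PySem.Int.mod (j + 1) i = 0 then 1 - s.1 else s.1
        (par, s.2 ++ [1 - par]))
      ((0 : Int), ([0] : List Int))).2)
  (PySem.List.pyRange 0 (number + 1) 1).map (fun i =>
    (PySem.List.pyRange 0 number 1).map (fun j =>
      PySem.List.pyGetD (PySem.List.pyGetD cols j []) i 0))

-- ===== PRECONDITION & SPEC =====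
def Spec_lamb_py (number : Int) (out : List (List Int)) : Prop := out = lamb_py_alt number
instance (number : Int) (out : List (List Int)) : Decidable (Spec_lamb_py number out) := by unfold Spec_lamb_py; infer_instance

-- ===== CLAIM (what is proved, stated in full; the proofs are below) =====
def Claim_equal_lamb_py : Prop := ∀ (number : Int), Dom_lamb_py number → Spec_lamb_py number (lamb_py number)

-- ===== LEMMAS AND PROOFS =====

-- the value of lamp j in row i: 0 in row 0, else 1 iff the count of divisors d in [2, i] of j+1 is even
def cellB (i j : Int) : Int :=
  if i = 0 then 0
  else
    let c := (PySem.List.pyRange 2 (i + 1) 1).foldl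
      (fun c d => if PySem.Int.mod (j + 1) d = 0 then c + 1 else c) (0 : Int)
    if PySem.Int.mod c 2 = 0 then 1 else 0

-- row i of the output
def rowB (n i : Int) : List Int := (PySem.List.pyRange 0 n 1).map (fun j => cellB i j)

-- the divisor count cellB folds up
def cnt (i j : Int) : Nat :=
  (PySem.List.pyRange 2 (i + 1) 1).countP (fun d => decide (PySem.Int.mod (j + 1) d = 0))

lemma cellB_eq (i j : Int) (hi : i ≠ 0) :
    cellB i j = if cnt i j % 2 = 0 then 1 else 0 := by
  simp only [cellB, if_neg hi, PySem.List.foldl_ite_add_one, cnt]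
  have : PySem.Int.mod ((0 : Int) + ((PySem.List.pyRange 2 (i + 1) 1).countP
      (fun d => decide (PySem.Int.mod (j + 1) d = 0)) : Int)) 2
      = (((PySem.List.pyRange 2 (i + 1) 1).countP
      (fun d => decide (PySem.Int.mod (j + 1) d = 0)) % 2 : Nat) : Int) := by
    rw [zero_add]; exact_mod_cast PySem.Int.mod_natCast _ 2
  rw [this]
  split_ifs with h1 h2 h2 <;> first | rfl | omega

lemma cnt_succ (i j : Int) (hi : 1 ≤ i) :
    cnt (i + 1) j = cnt i j + (if PySem.Int.mod (j + 1) (i + 1) = 0 then 1 else 0) := by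
  unfold cnt
  rw [PySem.List.pyRange_one_succ_right (by omega : (2 : Int) ≤ i + 1)]
  rw [List.countP_append]
  simp only [List.countP_cons, List.countP_nil]
  by_cases h : PySem.Int.mod (j + 1) (i + 1) = 0 <;> simp [h]

lemma cnt_one_zero (i : Int) (hi : 1 ≤ i) : PySem.Int.mod ((0 : Int) + 1) (i + 1) ≠ 0 := by
  intro h
  rw [PySem.Int.mod_eq_zero_iff_dvd] at h
  have := Int.le_of_dvd (by omega) h
  omega

lemma cnt_le_one (t j : Int) (ht : t ≤ 1) : cnt t j = 0 := by
  unfold cnt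
  rw [PySem.List.pyRange_one_eq_nil (by omega : t + 1 ≤ 2)]
  rfl

-- running parity of the divisor count
def pb (t j : Int) : Int := if cnt t j % 2 = 0 then 0 else 1

lemma cellB_pb (i j : Int) (hi : i ≠ 0) : cellB i j = 1 - pb i j := by
  rw [cellB_eq i j hi]; unfold pb; split_ifs <;> ring

lemma col_loop (j t : Int) (ht : 0 ≤ t) :
    ((PySem.List.pyRange 1 (t + 1) 1).foldl
      (fun s i =>
        let par := if ¬ i = 1 ∧ PySem.Int.mod (j + 1) i = 0 then 1 - s.1 else s.1
        (par, s.2 ++ [1 - par]))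
      ((0 : Int), ([0] : List Int)))
    = (pb t j, (PySem.List.pyRange 0 (t + 1) 1).map (fun i => cellB i j)) := by
  induction t, ht using Int.le_induction with
  | base =>
    rw [PySem.List.pyRange_one_eq_nil (by omega : (0:Int) + 1 ≤ 1),
        PySem.List.pyRange_one_singleton]
    simp [pb, cnt_le_one, cellB]
  | succ t ht ih =>
    rw [PySem.List.pyRange_one_succ_right (by omega : (1:Int) ≤ t + 1),
        List.foldl_append, ih]
    rw [PySem.List.pyRange_one_succ_right (by omega : (0:Int) ≤ t + 1), List.map_append]
    simp only [List.foldl_cons, List.foldl_nil, List.map_cons, List.map_nil]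
    have hpar : (if ¬ t + 1 = 1 ∧ PySem.Int.mod (j + 1) (t + 1) = 0 then 1 - pb t j else pb t j)
        = pb (t + 1) j := by
      by_cases ht1 : t = 0
      · subst ht1
        rw [if_neg (by norm_num)]
        unfold pb
        rw [cnt_le_one 0 j (by norm_num), cnt_le_one (0 + 1) j (by norm_num)]
      · unfold pb
        rw [cnt_succ t j (by omega)]
        by_cases hm : PySem.Int.mod (j + 1) (t + 1) = 0
        · rw [if_pos ⟨by omega, hm⟩, if_pos hm]
          split_ifs <;> omega
        · rw [if_neg (by tauto), if_neg hm]
          simp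
    rw [hpar, cellB_pb (t + 1) j (by omega)]

lemma alt_eq (n : Int) : lamb_py_alt n = (PySem.List.pyRange 0 (n + 1) 1).map (rowB n) := by
  simp only [lamb_py_alt]
  apply List.map_congr_left
  intro i hi
  rw [PySem.List.mem_pyRange_one] at hi
  unfold rowB
  apply List.map_congr_left
  intro j hj
  rw [PySem.List.mem_pyRange_one] at hj
  rw [PySem.List.pyGetD_map_pyRange_of_nonneg _ _ _ _ hj.1 hj.2]
  rw [col_loop j n (by omega)]
  exact PySem.List.pyGetD_map_pyRange_of_nonneg _ _ _ _ hi.1 hi.2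

lemma flip_row (n i : Int) (hn : 0 ≤ n) (hi : 1 ≤ i) :
    lambStep3 (rowB n i) (i + 1) = rowB n (i + 1) := by
  unfold lambStep3 rowB
  rw [PySem.List.enumerate_eq_map_pyRange (d := 0)]
  have hlen : PySem.List.len ((PySem.List.pyRange 0 n 1).map (fun j => cellB i j)) = n := by
    simp [PySem.List.len_eq, PySem.List.length_pyRange_one]; omega
  rw [hlen, List.map_map]
  apply List.map_congr_left
  intro j hj
  rw [PySem.List.mem_pyRange_one] at hj
  rw [Function.comp]
  rw [PySem.List.pyGetD_map_pyRange_of_nonneg _ _ _ _ hj.1 hj.2]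
  simp only
  have hi1 : i ≠ 0 := by omega
  have hi2 : i + 1 ≠ 0 := by omega
  rw [cellB_eq i j hi1, cellB_eq (i + 1) j hi2, cnt_succ i j hi]
  by_cases hm : PySem.Int.mod (j + 1) (i + 1) = 0
  · by_cases hj0 : 0 < j
    · rw [if_pos ⟨hj0, hm⟩, if_pos hm]
      unfold pyN
      split_ifs with h1 h2 h3 <;> first | rfl | omega
    · -- j = 0: the modulus condition is impossible
      have : j = 0 := by omega
      subst this
      exact absurd hm (cnt_one_zero i hi)
  · rw [if_neg hm, if_neg (by tauto), add_zero]

lemma loop3 (n : Int) (hn : 1 ≤ n) :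
    ∀ (f : Nat) (i : Int) (acc : List (List Int)), 2 ≤ i → i ≤ n → f = (n - i + 1).toNat →
      lambLoop n f 3 i (rowB n (i - 1)) acc = acc ++ (PySem.List.pyRange i (n + 1) 1).map (rowB n) := by
  intro f
  induction f with
  | zero => intro i acc h2 hle hf; omega
  | succ f ih =>
    intro i acc h2 hle hf
    simp only [lambLoop, reduceIte]
    by_cases hlt : i < n
    · rw [if_pos hlt]
      have hmod : PySem.Int.mod i n = i := by
        rw [PySem.Int.mod_eq_emod_of_pos (by omega : (0:Int) < n)]
        exact Int.emod_eq_of_lt (by omega) hlt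
      have hflip : lambStep3 (rowB n (i - 1)) (PySem.Int.mod i n) = rowB n i := by
        rw [hmod]
        have := flip_row n (i - 1) (by omega) (by omega)
        simpa using this
      rw [hflip]
      have ih' := ih (i + 1) (acc ++ [rowB n i]) (by omega) (by omega) (by omega)
      simp only [add_sub_cancel_right] at ih'
      rw [ih']
      rw [PySem.List.pyRange_one_cons (by omega : i < n + 1)]
      simp
    · rw [if_neg hlt]
      have hi : i = n := by omega
      subst hi
      have hflip : lambStep3 (rowB i (i - 1)) i = rowB i i := by
        have := flip_row i (i - 1) (by omega) (by omega)
        simpa using this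
      rw [hflip]
      have hf0 : f = 0 := by omega
      subst hf0
      simp only [lambLoop]
      rw [PySem.List.pyRange_one_singleton]
      simp

lemma row_zero (n : Int) : rowB n 0 = List.replicate n.toNat 0 := by
  unfold rowB
  rw [PySem.List.pyRange_one, List.map_map]
  simp [cellB, Function.comp_def, List.map_const']

lemma row_one (n : Int) : rowB n 1 = List.replicate n.toNat 1 := by
  unfold rowB
  rw [PySem.List.pyRange_one, List.map_map]
  have : ∀ j : Int, cellB 1 j = 1 := by
    intro j
    simp [cellB, PySem.Int.mod]
  simp [this, Function.comp_def, List.map_const']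

lemma main_eq (n : Int) : lamb_py n = lamb_py_alt n := by
  rcases lt_or_ge n 0 with h | h
  · have h1 : (n + 1).toNat = 0 := by omega
    have hA : lamb_py n = [] := by unfold lamb_py; rw [h1]; rfl
    rw [hA, alt_eq, PySem.List.pyRange_one_eq_nil (by omega : n + 1 ≤ 0)]
    rfl
  · rcases lt_or_ge n 2 with h2 | h2
    · interval_cases n <;> decide
    · -- n ≥ 2
      unfold lamb_py
      have hfuel : (n + 1).toNat = ((n - 1).toNat + 1) + 1 := by omega
      rw [hfuel]
      simp only [lambLoop, show ((4:Int) = 0) = False by decide,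
        show ((4:Int) = 3) = False by decide,
        if_true, if_false]
      rw [← row_zero, ← row_one]
      have := loop3 n (by omega) (n - 1).toNat 2 [rowB n 0, rowB n 1] (by omega) (by omega) (by omega)
      simp only [show (2 : Int) - 1 = 1 by ring] at this
      simp only [List.nil_append, List.singleton_append]
      rw [this, alt_eq]
      rw [PySem.List.pyRange_one_cons (by omega : (0:Int) < n + 1)]
      simp only [zero_add]
      rw [PySem.List.pyRange_one_cons (by omega : (1:Int) < n + 1)]
      simp only [show (1:Int) + 1 = 2 by norm_num]
      simp

-- ===== VERDICT (by name: the statement is the Claim_ definition above) =====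
theorem lamb_py_spec : Claim_equal_lamb_py := by
  intro n _
  unfold Spec_lamb_py
  exact main_eq n
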